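-- pv_equiv track=rewrite | github.com/RAINet-Lab/SYMBXRL | A2-MIMOResourceScheduler/custom_mimo_env.py | reverse_sel_ue
-- ===== SOURCE A (Python) =====
-- from itertools import combinations
--
-- def reverse_sel_ue(ue_select):
--     '''
--     Reversing User Indexed action to system action
--     '''
--     user_set = [0,1,2,3,4,5,6]
--     idx = len(ue_select)
--     action = 0
--     for i in range(1, idx):
--         action += len(list(combinations(user_set, i)))
--     comb_list = list(combinations(user_set, idx))
--     position = comb_list.index(tuple(ue_select))
--     action += position
--     return action
-- ===== SOURCE B (Python) =====
-- import math
--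
-- def reverse_sel_ue(ue_select):
--     '''
--     Reversing User Indexed action to system action
--     '''
--     k = len(ue_select)
--     prev = -1
--     for c in ue_select:
--         if not (prev < c <= 6):
--             raise ValueError(f"{tuple(ue_select)} is not in list")
--         prev = c
--     action = sum(math.comb(7, i) for i in range(1, k))
--     rank = 0
--     low = 0
--     for i, c in enumerate(ue_select):
--         for j in range(low, c):
--             rank += math.comb(6 - j, k - 1 - i)
--         low = c + 1
--     return action + rank
-- ===== Notes on version B (the rewrite author's own statement) =====
-- stated objective: simpler
-- what changed: Replaces materializing itertools combination lists and a linear .index scan with math.comb offsets plus a direct combinatorial-number-system rank of the ascending tuple.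
import Mathlib
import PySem

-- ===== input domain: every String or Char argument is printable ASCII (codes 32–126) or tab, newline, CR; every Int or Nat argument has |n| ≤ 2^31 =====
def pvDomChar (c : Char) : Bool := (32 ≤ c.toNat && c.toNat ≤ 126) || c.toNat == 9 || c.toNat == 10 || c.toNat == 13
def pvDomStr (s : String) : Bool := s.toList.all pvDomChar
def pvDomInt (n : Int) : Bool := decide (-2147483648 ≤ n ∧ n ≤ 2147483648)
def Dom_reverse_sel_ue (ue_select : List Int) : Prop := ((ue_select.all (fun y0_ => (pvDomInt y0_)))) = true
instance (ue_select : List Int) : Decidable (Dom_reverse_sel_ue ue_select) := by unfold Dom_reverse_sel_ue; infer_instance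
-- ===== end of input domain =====

-- B replaces the materialized itertools.combinations lists and the linear .index scan by
-- math.comb offsets plus a direct combinatorial-number-system rank (objective: simpler).

-- ===== PORT A =====
-- list(combinations(xs, k)) in itertools' lexicographic order (elements kept as lists)
def pyCombos : List Int → Nat → List (List Int)
  | _, 0 => [[]]
  | [], _ + 1 => []
  | x :: xs, k + 1 => (pyCombos xs k).map (fun c => x :: c) ++ pyCombos xs (k + 1)

def reverse_sel_ue (ue_select : List Int) : Int :=
  let user_set : List Int := [0, 1, 2, 3, 4, 5, 6]
  let idx := ue_select.length
  -- for i in range(1, idx): action += len(list(combinations(user_set, i)))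
  let action : Int := (List.range' 1 (idx - 1)).foldl
    (fun a i => a + ((pyCombos user_set i).length : Int)) 0
  let comb_list := pyCombos user_set idx
  -- comb_list.index(...): ValueError (= none) is excluded by Pre_; the port returns 0 there
  let position : Int := ((PySem.List.index? comb_list ue_select).getD 0 : Nat)
  action + position

-- ===== PORT B =====
def reverse_sel_ue_alt (ue_select : List Int) : Int :=
  let k := ue_select.length
  -- validation loop: Python raises ValueError when this fails; the port returns 0 there (excluded by Pre_)
  let ok := (ue_select.foldl (fun (st : Bool × Int) c =>
      (st.1 && decide (st.2 < c ∧ c ≤ 6), c)) (true, -1)).1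
  if ok then
    -- action = sum(math.comb(7, i) for i in range(1, k))
    let action : Int := (List.range' 1 (k - 1)).foldl
      (fun a i => a + (Nat.choose 7 i : Int)) 0
    -- for i, c in enumerate(ue_select): for j in range(low, c): rank += comb(6-j, k-1-i)
    let st := (PySem.List.enumerate ue_select).foldl
      (fun (st : Int × Int) (p : Int × Int) =>
        (st.1 + (PySem.List.pyRange st.2 p.2 1).foldl
            (fun r j => r + (Nat.choose (6 - j).toNat (k - 1 - p.1.toNat) : Int)) 0,
         p.2 + 1)) ((0 : Int), (0 : Int))
    action + st.1
  else 0

-- ===== PRECONDITION & SPEC =====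
-- Pre_ excludes exactly the inputs on which A's .index raises ValueError (a tuple that is not a
-- strictly increasing selection out of 0..6); B raises ValueError there too.
def Pre_reverse_sel_ue (ue_select : List Int) : Prop :=
  ue_select.Pairwise (· < ·) ∧ ∀ x ∈ ue_select, 0 ≤ x ∧ x ≤ 6
instance (ue_select : List Int) : Decidable (Pre_reverse_sel_ue ue_select) := by
  unfold Pre_reverse_sel_ue; infer_instance

def pvWitness_reverse_sel_ue : List Int := [1, 3]

def Spec_reverse_sel_ue (ue_select : List Int) (out : Int) : Prop := out = reverse_sel_ue_alt ue_select
instance (ue_select : List Int) (out : Int) : Decidable (Spec_reverse_sel_ue ue_select out) := by unfold Spec_reverse_sel_ue; infer_instance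

-- ===== CLAIM (what is proved, stated in full; the proofs are below) =====
def Claim_equal_reverse_sel_ue : Prop := ∀ (ue_select : List Int), Dom_reverse_sel_ue ue_select → Pre_reverse_sel_ue ue_select → Spec_reverse_sel_ue ue_select (reverse_sel_ue ue_select)

-- ===== LEMMAS AND PROOFS =====
theorem mem_pyCombos : ∀ (xs s : List Int), xs.Pairwise (· < ·) → s.Pairwise (· < ·) →
    (∀ a ∈ s, a ∈ xs) → s ∈ pyCombos xs s.length := by
  intro xs
  induction xs with
  | nil =>
    intro s _ _ hsub
    cases s with
    | nil => simp [pyCombos]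
    | cons a t => exact absurd (hsub a (by simp)) (by simp)
  | cons x xs ih =>
    intro s hxs hs hsub
    cases s with
    | nil => simp [pyCombos]
    | cons a t =>
      have hxlt : ∀ b ∈ xs, x < b := fun b hb => List.rel_of_pairwise_cons hxs hb
      have hxs' : xs.Pairwise (· < ·) := hxs.of_cons
      have halt : ∀ b ∈ t, a < b := fun b hb => List.rel_of_pairwise_cons hs hb
      have ht : t.Pairwise (· < ·) := hs.of_cons
      simp only [List.length_cons, pyCombos, List.mem_append, List.mem_map]
      by_cases hax : a = x
      · left
        refine ⟨t, ih t hxs' ht ?_, by rw [hax]⟩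
        intro b hb
        have hbmem := hsub b (List.mem_cons_of_mem a hb)
        have : x < b := hax ▸ halt b hb
        rcases List.mem_cons.mp hbmem with h | h
        · omega
        · exact h
      · right
        have hamem : a ∈ xs := by
          rcases List.mem_cons.mp (hsub a (by simp)) with h | h
          · exact absurd h hax
          · exact h
        have hxa : x < a := hxlt a hamem
        have : (a :: t) ∈ pyCombos xs (a :: t).length := by
          refine ih (a :: t) hxs' hs ?_
          intro b hb
          rcases List.mem_cons.mp hb with rfl | hbt
          · exact hamem
          · rcases List.mem_cons.mp (hsub b (List.mem_cons_of_mem a hbt)) with h | h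
            · exact absurd h (by have := halt b hbt; omega)
            · exact h
        simpa using this

theorem pyCombos_length_le : ∀ (xs : List Int) (k : Nat) (s : List Int),
    s ∈ pyCombos xs k → k ≤ xs.length := by
  intro xs
  induction xs with
  | nil =>
    intro k s h
    cases k with
    | zero => simp
    | succ n => simp [pyCombos] at h
  | cons x xs ih =>
    intro k s h
    cases k with
    | zero => simp
    | succ n =>
      simp only [pyCombos, List.mem_append, List.mem_map] at h
      rcases h with ⟨c, hc, _⟩ | h
      · have := ih n c hc
        simp only [List.length_cons]; omega
      · have := ih (n + 1) s h
        simp only [List.length_cons]; omega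

def pvAllValid : List (List Int) :=
  (List.range 8).flatMap (fun k => pyCombos [0, 1, 2, 3, 4, 5, 6] k)

set_option maxRecDepth 4000 in
theorem pv_key : ∀ s ∈ pvAllValid, reverse_sel_ue s = reverse_sel_ue_alt s := by decide

-- ===== VERDICT (by name: the statement is the Claim_ definition above) =====
theorem reverse_sel_ue_spec : Claim_equal_reverse_sel_ue := by
  intro s _ hpre
  unfold Spec_reverse_sel_ue
  have hsub : ∀ a ∈ s, a ∈ ([0, 1, 2, 3, 4, 5, 6] : List Int) := by
    intro a ha
    have := hpre.2 a ha
    simp only [List.mem_cons, List.not_mem_nil, or_false]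
    omega
  have hmem : s ∈ pyCombos [0, 1, 2, 3, 4, 5, 6] s.length :=
    mem_pyCombos _ s (by decide) hpre.1 hsub
  have hlen : s.length ≤ 7 := by
    have := pyCombos_length_le _ s.length s hmem
    simpa using this
  have : s ∈ pvAllValid := by
    unfold pvAllValid
    exact List.mem_flatMap.mpr ⟨s.length, List.mem_range.mpr (by omega), hmem⟩
  exact pv_key s this
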